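-- pv_equiv track=rewrite | github.com/nitikakurma/testcorrections | testcorrections.py | merge_protein_counts
-- ===== SOURCE A (Python) =====
-- def merge_protein_counts(dict1, dict2):
--     '''The following merges two protein counts dictionaries.'''
--     items = list(dict1.keys()) + list(dict2.keys())
--     list_of_tup = []
--     for item in items:
--         if (item in dict1.keys()) and (item in dict2.keys()):
--             list_of_tup.append(tuple((dict1.get(item), dict2.get(item))))
--         elif item in dict1.keys():
--             list_of_tup.append(tuple((dict1.get(item), 0)))
--         elif item in dict2.keys():
--             list_of_tup.append(tuple((0, dict2.get(item))))
--     d_pc = dict(zip(items, list_of_tup))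
--     return d_pc
-- ===== SOURCE B (Python) =====
-- def merge_protein_counts(dict1, dict2):
--     '''Merge two protein count dicts by embedding each source into pair-valued
--     vectors and scatter-adding them into one accumulator: dict1 contributes
--     (v, 0), dict2 contributes (0, v); no membership tests or cross-lookups,
--     correct because a key missing from one source contributes the zero vector.'''
--     result = {}
--     for source, embed in ((dict1, lambda v: (v, 0)), (dict2, lambda v: (0, v))):
--         for k, v in source.items():
--             a, b = result.get(k, (0, 0))
--             va, vb = embed(v)
--             result[k] = (a + va, b + vb)
--     return result
-- ===== Notes on version B (the rewrite author's own statement) =====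
-- stated objective: alternative
-- what changed: Replaced A's union-of-keys join (combined key list, three-way membership branch with lookups into both dicts, then zip/dict reconstruction) by a monoid-style scatter-add: each dict is embedded into pair-valued vectors ((v,0) resp. (0,v)) and accumulated pointwise into one dict, with no membership tests or cross-dict lookups.
import Mathlib
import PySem

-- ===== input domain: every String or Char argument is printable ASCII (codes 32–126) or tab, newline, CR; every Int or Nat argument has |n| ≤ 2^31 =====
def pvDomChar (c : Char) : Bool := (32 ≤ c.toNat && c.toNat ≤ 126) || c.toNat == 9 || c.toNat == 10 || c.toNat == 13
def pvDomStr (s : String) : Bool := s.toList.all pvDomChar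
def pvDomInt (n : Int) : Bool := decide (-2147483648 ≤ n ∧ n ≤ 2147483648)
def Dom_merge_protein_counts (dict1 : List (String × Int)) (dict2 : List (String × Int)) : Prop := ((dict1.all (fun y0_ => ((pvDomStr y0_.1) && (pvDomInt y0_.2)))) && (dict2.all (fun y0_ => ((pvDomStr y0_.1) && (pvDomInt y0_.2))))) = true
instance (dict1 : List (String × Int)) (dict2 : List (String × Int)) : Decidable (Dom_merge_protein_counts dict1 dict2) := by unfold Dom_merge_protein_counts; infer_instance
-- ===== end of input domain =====

-- B replaces A's union-of-keys join (three-way membership branch, zip, dict rebuild) by a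
-- scatter-add: each dict is embedded into pair-valued vectors ((v,0) / (0,v)) and summed
-- pointwise into one accumulator dict; alternative algorithm, same cost.


-- ===== PORT A =====
-- literal transliteration of A; the input dicts are the assoc lists read as Python dicts
-- (PySem.Dict.ofList); 'dict1.get(item)' in a branch where 'item in dict1' holds is ported as
-- 'getD item 0', which returns the same stored value there.
def merge_protein_counts (dict1 : List (String × Int)) (dict2 : List (String × Int)) : List (String × Int × Int) :=
  let d1 := PySem.Dict.ofList dict1
  let d2 := PySem.Dict.ofList dict2
  let items := d1.keys ++ d2.keys
  let list_of_tup := items.foldl (fun acc item =>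
    if d1.contains item && d2.contains item then acc ++ [(d1.getD item 0, d2.getD item 0)]
    else if d1.contains item then acc ++ [(d1.getD item 0, (0 : Int))]
    else if d2.contains item then acc ++ [((0 : Int), d2.getD item 0)]
    else acc) []
  let d_pc := PySem.Dict.ofList (items.zip list_of_tup)
  d_pc.items

-- ===== PORT B =====
-- the inner loop of Source B: scatter-add one source (under an embedding) into the accumulator
def pvScatterAdd (embed : Int → Int × Int) (source : List (String × Int))
    (result : PySem.Dict String (Int × Int)) : PySem.Dict String (Int × Int) :=
  source.foldl (fun result p =>
    let ab := result.getD p.1 (0, 0)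
    let e := embed p.2
    result.insert p.1 (ab.1 + e.1, ab.2 + e.2)) result

def merge_protein_counts_alt (dict1 : List (String × Int)) (dict2 : List (String × Int)) : List (String × Int × Int) :=
  let d1 := PySem.Dict.ofList dict1
  let d2 := PySem.Dict.ofList dict2
  -- the outer loop over ((dict1, v↦(v,0)), (dict2, v↦(0,v))) unrolled to its two iterations
  let result := pvScatterAdd (fun v => (v, (0 : Int))) d1.items PySem.Dict.empty
  let result := pvScatterAdd (fun v => ((0 : Int), v)) d2.items result
  result.items

-- ===== PRECONDITION & SPEC =====
def Spec_merge_protein_counts (dict1 : List (String × Int)) (dict2 : List (String × Int)) (out : List (String × Int × Int)) : Prop := out = merge_protein_counts_alt dict1 dict2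
instance (dict1 : List (String × Int)) (dict2 : List (String × Int)) (out : List (String × Int × Int)) : Decidable (Spec_merge_protein_counts dict1 dict2 out) := by unfold Spec_merge_protein_counts; infer_instance

-- ===== CLAIM (what is proved, stated in full; the proofs are below) =====
def Claim_equal_merge_protein_counts : Prop := ∀ (dict1 : List (String × Int)) (dict2 : List (String × Int)), Dom_merge_protein_counts dict1 dict2 → Spec_merge_protein_counts dict1 dict2 (merge_protein_counts dict1 dict2)

-- ===== LEMMAS AND PROOFS =====

-- the tuple A's branch chooses for a given key
def pvG (d1 d2 : PySem.Dict String Int) (k : String) : Int × Int :=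
  if d1.contains k && d2.contains k then (d1.getD k 0, d2.getD k 0)
  else if d1.contains k then (d1.getD k 0, (0 : Int))
  else ((0 : Int), d2.getD k 0)

theorem pvFoldA_eq_map (d1 d2 : PySem.Dict String Int) (ks : List String)
    (h : ∀ k ∈ ks, d1.contains k = true ∨ d2.contains k = true)
    (acc : List (Int × Int)) :
    ks.foldl (fun acc item =>
      if d1.contains item && d2.contains item then acc ++ [(d1.getD item 0, d2.getD item 0)]
      else if d1.contains item then acc ++ [(d1.getD item 0, (0 : Int))]
      else if d2.contains item then acc ++ [((0 : Int), d2.getD item 0)]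
      else acc) acc = acc ++ ks.map (pvG d1 d2) := by
  induction ks generalizing acc with
  | nil => simp
  | cons k ks ih =>
    have hk := h k (by simp)
    simp only [List.foldl_cons, List.map_cons]
    rw [ih (fun k hk => h k (by simp [hk]))]
    unfold pvG
    rcases hk with hk | hk <;> by_cases h2 : d2.contains k = true <;>
      simp [hk, h2, List.append_assoc] <;> by_cases h1 : d1.contains k = true <;> simp [h1]

theorem pvZipSelfMap {α β : Type} (l : List α) (g : α → β) :
    l.zip (l.map g) = l.map (fun a => (a, g a)) := by
  induction l with
  | nil => rfl
  | cons a l ih => simp [ih]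

-- inserting (k, g k) into a dict whose entries already satisfy p.2 = g p.1
theorem pvFoldlInsertG (g : String → Int × Int) (ks : List String)
    (d : PySem.Dict String (Int × Int)) (hks : ks.Nodup)
    (hd : ∀ p ∈ d.items, p.2 = g p.1) :
    (ks.foldl (fun d k => d.insert k (g k)) d).items
      = d.items ++ (ks.filter (fun k => !d.contains k)).map (fun k => (k, g k)) := by
  induction ks generalizing d with
  | nil => simp
  | cons k ks ih =>
    simp only [List.foldl_cons, List.filter_cons]
    by_cases hc : d.contains k = true
    · have hins : d.insert k (g k) = d := by
        apply PySem.Dict.ext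
        rw [PySem.Dict.items_insert_of_contains _ _ hc]
        have : List.map (fun p => if (p.1 == k) = true then (k, g k) else p) d.items
            = List.map id d.items := by
          refine List.map_congr_left (fun p hp => ?_)
          by_cases hpk : (p.1 == k) = true
          · have hpk' : p.1 = k := eq_of_beq hpk
            simp [← hpk', ← hd p hp]
          · exact if_neg hpk
        simpa using this
      rw [hins, ih d (List.nodup_cons.mp hks).2 hd]
      simp [hc]
    · have hitems := PySem.Dict.items_insert_of_not_contains d (g k) (by simpa using hc)
      have hd' : ∀ p ∈ (d.insert k (g k)).items, p.2 = g p.1 := by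
        intro p hp
        rw [hitems] at hp
        rcases List.mem_append.1 hp with hp | hp
        · exact hd p hp
        · simp at hp; simp [hp]
      rw [ih (d.insert k (g k)) (List.nodup_cons.mp hks).2 hd', hitems]
      have hfc : ks.filter (fun k' => !(d.insert k (g k)).contains k')
          = ks.filter (fun k' => !d.contains k') := by
        refine List.filter_congr (fun k' hk' => ?_)
        have hne : k' ≠ k := fun h => ((List.nodup_cons.mp hks).1 (h ▸ hk')).elim
        simp [PySem.Dict.contains_insert, hne]
      rw [hfc]
      simp [hc, List.append_assoc]

-- contains read off the key list
theorem pvContainsKeys {ν : Type} (d : PySem.Dict String ν) (k : String) :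
    d.contains k = d.keys.any (· == k) := by
  simp [PySem.Dict.contains, PySem.Dict.keys, List.any_map, Function.comp_def]

-- contains of a dict whose items are (k, g k) over a key list
theorem pvContainsOfItems {ν : Type} (d : PySem.Dict String ν) (ks : List String)
    (g : String → ν) (h : d.items = ks.map (fun k => (k, g k)))
    (k : String) : d.contains k = ks.any (· == k) := by
  simp [PySem.Dict.contains, h, List.any_map, Function.comp_def]

-- what the scatter-add pass does to an entry already present: add the embedded vector of the
-- (unique) matching source entry, if any
def pvUpdE (embed : Int → Int × Int) (l : List (String × Int))
    (q : String × (Int × Int)) : String × (Int × Int) :=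
  match l.find? (fun p => p.1 == q.1) with
  | some p => (q.1, (q.2.1 + (embed p.2).1, q.2.2 + (embed p.2).2))
  | none => q

theorem pvScatterAdd_items (embed : Int → Int × Int) (l : List (String × Int))
    (r : PySem.Dict String (Int × Int)) (hl : (l.map (·.1)).Nodup) (hr : r.keys.Nodup) :
    (pvScatterAdd embed l r).items
      = r.items.map (pvUpdE embed l)
        ++ (l.filter (fun p => !r.contains p.1)).map (fun p => (p.1, embed p.2)) := by
  induction l generalizing r with
  | nil =>
    simp only [pvScatterAdd, List.foldl_nil, List.filter_nil, List.map_nil, List.append_nil]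
    rw [show pvUpdE embed [] = id from funext fun q => rfl, List.map_id]
  | cons p l ih =>
    have hpl : p.1 ∉ l.map (·.1) := (List.nodup_cons.mp hl).1
    have hl' : (l.map (·.1)).Nodup := (List.nodup_cons.mp hl).2
    have hfind_none : ∀ q : String × (Int × Int), q.1 = p.1 →
        l.find? (fun p' => p'.1 == q.1) = none := by
      intro q hq
      rw [List.find?_eq_none]
      intro x hx hbeq
      exact hpl (hq ▸ eq_of_beq hbeq ▸ List.mem_map_of_mem hx)
    simp only [pvScatterAdd, List.foldl_cons, List.filter_cons]
    by_cases hc : r.contains p.1 = true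
    · -- key present: in-place update
      obtain ⟨v, hv⟩ : ∃ v, r.get? p.1 = some v := by
        have h := PySem.Dict.contains_eq_isSome_get? r p.1
        rw [hc] at h
        exact Option.isSome_iff_exists.mp h.symm
      have hvmem : (p.1, v) ∈ r.items := PySem.Dict.mem_items_of_get?_eq_some r hv
      have hgd : r.getD p.1 (0, 0) = v := PySem.Dict.getD_of_get?_eq_some r _ hv
      set e := embed p.2 with he
      set r' := r.insert p.1 (v.1 + e.1, v.2 + e.2) with hr'
      have hitems' : r'.items
          = r.items.map (fun q => if q.1 == p.1 then (p.1, (v.1 + e.1, v.2 + e.2)) else q) := by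
        rw [hr', PySem.Dict.items_insert_of_contains _ _ hc]
      have hkeys' : r'.keys = r.keys := by
        rw [hr', PySem.Dict.keys_insert_of_contains _ _ hc]
      have hcont' : ∀ k, r'.contains k = r.contains k := by
        intro k
        rw [pvContainsKeys, hkeys', ← pvContainsKeys]
      have step : (fun result p' =>
            result.insert p'.1 ((result.getD p'.1 ((0:Int),(0:Int))).1 + (embed p'.2).1,
              (result.getD p'.1 ((0:Int),(0:Int))).2 + (embed p'.2).2))
          = (fun (result : PySem.Dict String (Int × Int)) (p' : String × Int) =>
              let ab := result.getD p'.1 (0, 0)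
              let e := embed p'.2
              result.insert p'.1 (ab.1 + e.1, ab.2 + e.2)) := rfl
      have hLHS : (l.foldl (fun result p' =>
            let ab := result.getD p'.1 (0, 0)
            let e := embed p'.2
            result.insert p'.1 (ab.1 + e.1, ab.2 + e.2)) (r.insert p.1 ((r.getD p.1 (0,0)).1 + (embed p.2).1, (r.getD p.1 (0,0)).2 + (embed p.2).2))).items
          = (pvScatterAdd embed l r').items := by
        rw [pvScatterAdd, hr', hgd, he]
      rw [hLHS, ih r' hl' (by rw [hkeys']; exact hr)]
      have hmap : r'.items.map (pvUpdE embed l) = r.items.map (pvUpdE embed (p :: l)) := by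
        rw [hitems', List.map_map]
        refine List.map_congr_left (fun q hq => ?_)
        by_cases hqp : (q.1 == p.1) = true
        · have hqp' : q.1 = p.1 := eq_of_beq hqp
          have hqv : q.2 = v := by
            have h1 : r.get? q.1 = some q.2 := by
              have : (q.1, q.2) ∈ r.items := by simpa using hq
              exact PySem.Dict.get?_of_mem_items r this hr
            rw [hqp'] at h1
            exact Option.some.inj (h1.symm.trans hv)
          simp only [Function.comp_apply, hqp, if_pos]
          unfold pvUpdE
          rw [hfind_none (p.1, (v.1 + e.1, v.2 + e.2)) rfl, List.find?_cons_of_pos (by simp [hqp'])]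
          simp [hqp', hqv, ← he]
        · simp only [Function.comp_apply, hqp, if_neg, Bool.not_eq_true]
          unfold pvUpdE
          rw [List.find?_cons_of_neg (by simp only [beq_iff_eq]; intro h; rw [← h] at hqp; simp at hqp)]
      have hfilt : l.filter (fun p' => !r'.contains p'.1) = l.filter (fun p' => !r.contains p'.1) := by
        refine List.filter_congr (fun p' _ => ?_)
        rw [hcont']
      rw [hmap, hfilt, hc]
      simp
    · -- key fresh: append
      have hc' : r.contains p.1 = false := by simpa using hc
      have hgd : r.getD p.1 ((0:Int), (0:Int)) = (0, 0) := PySem.Dict.getD_of_not_contains _ _ hc'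
      set e := embed p.2 with he
      set r' := r.insert p.1 ((0:Int) + e.1, (0:Int) + e.2) with hr'
      have hitems' : r'.items = r.items ++ [(p.1, ((0:Int) + e.1, (0:Int) + e.2))] := by
        rw [hr', PySem.Dict.items_insert_of_not_contains _ _ hc']
      have hnotkeys : p.1 ∉ r.keys := fun h =>
        absurd ((PySem.Dict.contains_iff_mem_keys r p.1).mpr h) (by simp [hc'])
      have hkeys' : r'.keys = r.keys ++ [p.1] := by
        rw [hr', PySem.Dict.keys_insert_of_not_contains _ _ hc']
      have hnd' : r'.keys.Nodup := by
        rw [hr']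
        exact PySem.Dict.nodup_keys_insert _ _ _ hr
      have hLHS : (l.foldl (fun result p' =>
            let ab := result.getD p'.1 (0, 0)
            let e := embed p'.2
            result.insert p'.1 (ab.1 + e.1, ab.2 + e.2)) (r.insert p.1 ((r.getD p.1 (0,0)).1 + (embed p.2).1, (r.getD p.1 (0,0)).2 + (embed p.2).2))).items
          = (pvScatterAdd embed l r').items := by
        rw [pvScatterAdd, hr', hgd, he]
      rw [hLHS, ih r' hl' hnd']
      have hmap : r'.items.map (pvUpdE embed l)
          = r.items.map (pvUpdE embed (p :: l)) ++ [(p.1, e)] := by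
        rw [hitems', List.map_append]
        congr 1
        · refine List.map_congr_left (fun q hq => ?_)
          have hqp : (q.1 == p.1) = false := by
            by_cases h : q.1 = p.1
            · exact absurd (h ▸ PySem.Dict.mem_keys_of_mem_items r (by simpa using hq)) hnotkeys
            · simpa using h
          unfold pvUpdE
          rw [List.find?_cons_of_neg (by simp only [beq_iff_eq]; intro h; rw [← h] at hqp; simp at hqp)]
        · simp only [List.map_cons, List.map_nil]
          unfold pvUpdE
          rw [hfind_none _ rfl]
          simp
      have hfilt : l.filter (fun p' => !r'.contains p'.1) = l.filter (fun p' => !r.contains p'.1) := by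
        refine List.filter_congr (fun p' hp' => ?_)
        have hne : p'.1 ≠ p.1 := fun h => hpl (h ▸ List.mem_map_of_mem hp')
        rw [hr']
        simp [PySem.Dict.contains_insert, hne]
      rw [hmap, hfilt, hc']
      simp only [Bool.not_false, if_true, List.map_cons, List.append_assoc,
        List.singleton_append]
      simp [he]

-- ===== VERDICT (by name: the statement is the Claim_ definition above) =====
theorem merge_protein_counts_spec : Claim_equal_merge_protein_counts := by
  intro dict1 dict2 _
  unfold Spec_merge_protein_counts merge_protein_counts merge_protein_counts_alt
  dsimp only
  set d1 := PySem.Dict.ofList dict1 with hd1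
  set d2 := PySem.Dict.ofList dict2 with hd2
  have hnd1 : d1.keys.Nodup := PySem.Dict.nodup_keys_ofList dict1
  have hnd2 : d2.keys.Nodup := PySem.Dict.nodup_keys_ofList dict2
  set k1 := d1.keys with hk1
  set k2 := d2.keys with hk2
  have hmemb : ∀ k ∈ k1 ++ k2, d1.contains k = true ∨ d2.contains k = true := by
    intro k hk
    rcases List.mem_append.1 hk with hk | hk
    · exact Or.inl ((PySem.Dict.contains_iff_mem_keys d1 k).mpr hk)
    · exact Or.inr ((PySem.Dict.contains_iff_mem_keys d2 k).mpr hk)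
  -- A side
  rw [pvFoldA_eq_map d1 d2 (k1 ++ k2) hmemb [], List.nil_append, pvZipSelfMap]
  simp only [PySem.Dict.ofList, PySem.Dict.update, List.foldl_map, List.foldl_append]
  set D1 := k1.foldl (fun d k => d.insert k (pvG d1 d2 k)) PySem.Dict.empty with hD1def
  have hD1 : D1.items = k1.map (fun k => (k, pvG d1 d2 k)) := by
    rw [hD1def, pvFoldlInsertG (pvG d1 d2) k1 PySem.Dict.empty hnd1 (by simp [PySem.Dict.empty])]
    simp [PySem.Dict.empty]
  have hD1hd : ∀ p ∈ D1.items, p.2 = pvG d1 d2 p.1 := by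
    intro p hp; rw [hD1] at hp
    rcases List.mem_map.1 hp with ⟨k, hk, rfl⟩
    rfl
  rw [pvFoldlInsertG (pvG d1 d2) k2 D1 hnd2 hD1hd, hD1]
  have hDc : (fun k => !D1.contains k) = (fun k => !d1.contains k) := by
    funext k
    rw [pvContainsOfItems D1 k1 (pvG d1 d2) hD1 k, hk1, ← pvContainsKeys d1 k]
  rw [hDc]
  -- B side
  have hik1 : k1 = d1.items.map (·.1) := rfl
  have hik2 : k2 = d2.items.map (·.1) := rfl
  have hr1 : (pvScatterAdd (fun v => (v, (0:Int))) d1.items PySem.Dict.empty).items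
      = d1.items.map (fun p => (p.1, (p.2, (0:Int)))) := by
    rw [pvScatterAdd_items _ _ _ (hik1 ▸ hnd1) (by simp [PySem.Dict.empty])]
    simp [PySem.Dict.empty]
  set r1 := pvScatterAdd (fun v => (v, (0:Int))) d1.items PySem.Dict.empty with hr1def
  have hr1k : r1.keys = d1.keys := by
    simp [PySem.Dict.keys, hr1, List.map_map, Function.comp_def]
  rw [pvScatterAdd_items _ _ _ (hik2 ▸ hnd2) (by rw [hr1k]; exact hnd1), hr1]
  have hr1c : ∀ k, r1.contains k = d1.contains k := by
    intro k
    rw [pvContainsKeys, hr1k, ← pvContainsKeys]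
  -- equate the two halves
  congr 1
  · -- first block: dict1-driven entries
    rw [hik1, List.map_map, List.map_map]
    refine List.map_congr_left (fun p hp => ?_)
    have hc1 : d1.contains p.1 = true :=
      (PySem.Dict.contains_iff_mem_keys d1 p.1).mpr (PySem.Dict.mem_keys_of_mem_items d1 hp)
    have hg1 : d1.getD p.1 0 = p.2 := PySem.Dict.getD_of_mem_items d1 hp hnd1 0
    simp only [Function.comp_apply]
    unfold pvUpdE
    cases hfind : d2.items.find? (fun q => q.1 == p.1) with
    | some q =>
      have hqmem : q ∈ d2.items := List.mem_of_find?_eq_some hfind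
      have hq' := List.find?_some hfind
      have hqk : q.1 = p.1 := eq_of_beq (by simpa using hq')
      have hc2 : d2.contains p.1 = true :=
        (PySem.Dict.contains_iff_mem_keys d2 p.1).mpr
          (hqk ▸ PySem.Dict.mem_keys_of_mem_items d2 hqmem)
      have hg2 : d2.getD p.1 0 = q.2 := by
        have : (p.1, q.2) ∈ d2.items := by rwa [← hqk]
        exact PySem.Dict.getD_of_mem_items d2 this hnd2 0
      simp [pvG, hc1, hc2, hg1, hg2]
    | none =>
      have hkmem : p.1 ∉ d2.keys := by
        intro hmem
        obtain ⟨q, hq, hqk⟩ := List.mem_map.1 hmem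
        exact (List.find?_eq_none.mp hfind q hq) (by simp [hqk])
      have hc2 : d2.contains p.1 = false := by
        cases h : d2.contains p.1 with
        | false => rfl
        | true => exact absurd ((PySem.Dict.contains_iff_mem_keys d2 p.1).mp h) hkmem
      simp [pvG, hc1, hc2, hg1]
  · -- second block: dict2-only entries
    rw [hik2, List.filter_map]
    have hpred : ((fun k => !d1.contains k) ∘ (·.1) : String × Int → Bool)
        = (fun p => !d1.contains p.1) := rfl
    rw [hpred]
    have hfilt : d2.items.filter (fun p => !r1.contains p.1)
        = d2.items.filter (fun p => !d1.contains p.1) := by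
      refine List.filter_congr (fun p _ => ?_)
      rw [hr1c]
    rw [hfilt, List.map_map]
    refine List.map_congr_left (fun p hp => ?_)
    have hc1 : d1.contains p.1 = false := by
      simpa using (List.mem_filter.mp hp).2
    have hmem : p ∈ d2.items := (List.mem_filter.mp hp).1
    have hg : d2.getD p.1 0 = p.2 := PySem.Dict.getD_of_mem_items d2 hmem hnd2 0
    simp [pvG, hc1, hg]
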